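-- pv_equiv track=rewrite | github.com/digital-duck/semanscope | semanscope/components/embedding_viz.py | rearrange_by_ollama
-- ===== SOURCE A (Python) =====
-- def rearrange_by_ollama(models):
--     l1 = []
--     l2 = []
--     for i in models:
--         if "(Ollama)" in i:
--             l2.append(i)
--         else:
--             l1.append(i)
--     return l1 + l2
-- ===== SOURCE B (Python) =====
-- def rearrange_by_ollama(models):
--     return sorted(models, key=lambda m: "(Ollama)" in m)
-- ===== Notes on version B (the rewrite author's own statement) =====
-- stated objective: idiomatic
-- what changed: Replaces the explicit two-list partition pass with a single stable sort on the boolean key '"(Ollama)" in m', relying on sort stability and False < True to keep non-Ollama entries first in original order.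
import Mathlib
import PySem

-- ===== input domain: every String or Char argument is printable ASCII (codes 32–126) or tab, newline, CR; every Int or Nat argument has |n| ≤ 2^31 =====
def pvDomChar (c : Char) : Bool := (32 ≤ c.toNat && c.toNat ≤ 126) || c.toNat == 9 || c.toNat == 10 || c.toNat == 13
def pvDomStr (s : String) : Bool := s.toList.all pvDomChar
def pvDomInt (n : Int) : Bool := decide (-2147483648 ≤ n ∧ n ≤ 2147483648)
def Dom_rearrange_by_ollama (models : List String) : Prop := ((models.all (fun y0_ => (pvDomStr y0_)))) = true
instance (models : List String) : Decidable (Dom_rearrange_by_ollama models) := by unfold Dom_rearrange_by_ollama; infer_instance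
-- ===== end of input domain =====

-- B replaces A's explicit two-list partition with one stable sort on the boolean key "(Ollama)" in m (idiomatic; same result by sort stability).


-- ===== PORT A =====
-- literal port of A: two accumulators l1/l2 built in one loop, then l1 ++ l2
def rearrange_by_ollama (models : List String) : List String :=
  let r := models.foldl
    (fun (s : List String × List String) i =>
      if PySem.Str.isIn "(Ollama)" i then (s.1, s.2 ++ [i]) else (s.1 ++ [i], s.2))
    ([], [])
  r.1 ++ r.2

-- ===== PORT B =====
-- literal port of B: sorted(models, key=lambda m: "(Ollama)" in m); Python's False/True sort as 0/1
def rearrange_by_ollama_alt (models : List String) : List String :=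
  PySem.List.sorted models (fun m => if PySem.Str.isIn "(Ollama)" m then (1 : Nat) else 0) false

-- ===== PRECONDITION & SPEC =====
def Spec_rearrange_by_ollama (models : List String) (out : List String) : Prop := out = rearrange_by_ollama_alt models
instance (models : List String) (out : List String) : Decidable (Spec_rearrange_by_ollama models out) := by unfold Spec_rearrange_by_ollama; infer_instance

-- ===== CLAIM (what is proved, stated in full; the proofs are below) =====
def Claim_equal_rearrange_by_ollama : Prop := ∀ (models : List String), Dom_rearrange_by_ollama models → Spec_rearrange_by_ollama models (rearrange_by_ollama models)

-- ===== LEMMAS AND PROOFS =====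

-- the boolean key and the comparison used by the insertion sort
def pvKey (m : String) : Nat := if PySem.Str.isIn "(Ollama)" m then 1 else 0

def pvBefore (a b : String) : Bool := decide (pvKey a < pvKey b)

-- inserting x into a list 'non-Ollama block ++ Ollama block' keeps the partition shape
lemma insertBy_partition (x : String) :
    ∀ (l1 l2 : List String),
      (∀ m ∈ l1, PySem.Str.isIn "(Ollama)" m = false) →
      (∀ m ∈ l2, PySem.Str.isIn "(Ollama)" m = true) →
      PySem.List.insertBy pvBefore x (l1 ++ l2) =
        if PySem.Str.isIn "(Ollama)" x then l1 ++ l2 ++ [x] else l1 ++ x :: l2 := by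
  intro l1
  induction l1 with
  | nil =>
    intro l2 _ h2
    induction l2 with
    | nil => simp [PySem.List.insertBy]
    | cons y ys ih =>
      have hy : PySem.Str.isIn "(Ollama)" y = true := h2 y (by simp)
      have ih' := ih (fun m hm => h2 m (by simp [hm]))
      by_cases hx : PySem.Str.isIn "(Ollama)" x
      · rw [if_pos hx] at ih' ⊢
        simp only [List.nil_append] at ih' ⊢
        simp only [PySem.List.insertBy, pvBefore, pvKey, hx, hy]
        simp [ih']
      · rw [if_neg hx] at ih' ⊢
        simp only [List.nil_append] at ih' ⊢
        simp only [PySem.List.insertBy, pvBefore, pvKey, hx, hy]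
        simp
  | cons y ys ih =>
    intro l2 h1 h2
    have hy : PySem.Str.isIn "(Ollama)" y = false := h1 y (by simp)
    have step := ih l2 (fun m hm => h1 m (by simp [hm])) h2
    by_cases hx : PySem.Str.isIn "(Ollama)" x
    · rw [if_pos hx] at step ⊢
      simp only [List.cons_append, PySem.List.insertBy, pvBefore, pvKey, hx, hy]
      simp [step]
    · rw [if_neg hx] at step ⊢
      simp only [List.cons_append, PySem.List.insertBy, pvBefore, pvKey, hx, hy]
      simp [step]

-- loop invariant: A's pair fold and B's insertion-sort fold agree, given the partition shape
lemma fold_invariant :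
    ∀ (models l1 l2 : List String),
      (∀ m ∈ l1, PySem.Str.isIn "(Ollama)" m = false) →
      (∀ m ∈ l2, PySem.Str.isIn "(Ollama)" m = true) →
      (models.foldl (fun acc x => PySem.List.insertBy pvBefore x acc) (l1 ++ l2)) =
        (let r := models.foldl
          (fun (s : List String × List String) i =>
            if PySem.Str.isIn "(Ollama)" i then (s.1, s.2 ++ [i]) else (s.1 ++ [i], s.2))
          (l1, l2)
        r.1 ++ r.2) := by
  intro models
  induction models with
  | nil => intro l1 l2 _ _; simp
  | cons x xs ih =>
    intro l1 l2 h1 h2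
    simp only [List.foldl_cons]
    rw [insertBy_partition x l1 l2 h1 h2]
    by_cases hx : PySem.Str.isIn "(Ollama)" x
    · rw [if_pos hx, if_pos hx]
      have hl2 : ∀ m ∈ l2 ++ [x], PySem.Str.isIn "(Ollama)" m = true := by
        intro m hm
        rcases List.mem_append.mp hm with h | h
        · exact h2 m h
        · simp at h; subst h; exact hx
      have := ih l1 (l2 ++ [x]) h1 hl2
      rw [← List.append_assoc] at this
      exact this
    · rw [if_neg hx, if_neg hx]
      have hl1 : ∀ m ∈ l1 ++ [x], PySem.Str.isIn "(Ollama)" m = false := by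
        intro m hm
        rcases List.mem_append.mp hm with h | h
        · exact h1 m h
        · simp at h; subst h; simpa using hx
      have := ih (l1 ++ [x]) l2 hl1 h2
      simpa using this

-- ===== VERDICT (by name: the statement is the Claim_ definition above) =====
theorem rearrange_by_ollama_spec : Claim_equal_rearrange_by_ollama := by
  intro models _
  unfold Spec_rearrange_by_ollama rearrange_by_ollama rearrange_by_ollama_alt
  have hB : PySem.List.sorted models
      (fun m => if PySem.Str.isIn "(Ollama)" m then (1 : Nat) else 0) false =
      models.foldl (fun acc x => PySem.List.insertBy pvBefore x acc) [] := by
    rw [PySem.List.sorted]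
    have : (if (false : Bool) = true then
        (fun a b : String => decide ((if PySem.Str.isIn "(Ollama)" b then (1:Nat) else 0) <
          (if PySem.Str.isIn "(Ollama)" a then (1:Nat) else 0)))
      else (fun a b : String => decide ((if PySem.Str.isIn "(Ollama)" a then (1:Nat) else 0) <
          (if PySem.Str.isIn "(Ollama)" b then (1:Nat) else 0)))) = pvBefore := by
      rw [if_neg (by simp)]
      funext a b
      simp [pvBefore, pvKey]
    rw [this]
  rw [hB]
  have h := fold_invariant models [] [] (by simp) (by simp)
  simp only [List.nil_append] at h
  rw [h]
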